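-- pv_equiv track=rewrite | github.com/microsoft/CodeBERT | CodeExecutor/inference/metric.py | parse_gold_into_sent
-- ===== SOURCE A (Python) =====
-- def parse_gold_into_sent(text):
--     text_list = []
--     parse_loc = []
--     start_len = 0
--     while True:
--         num = text.find("<line>",start_len)
--         if num == -1: break
--         parse_loc.append(num)
--         start_len = num + 1
--     start_len = 0
--     while True:
--         num = text.find("<output>",start_len)
--         if num == -1: break
--         parse_loc.append(num)
--         start_len = num + 1
--     # add 0 and len(text)
--     parse_loc.append(0)
--     parse_loc.append(len(text))
--     parse_loc = list(set(parse_loc))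
--     parse_loc.sort()
--
--     for i, loc in enumerate(parse_loc):
--         if i == 0: continue
--         # remove the last incomplete sentence in gold
--         if i == len(parse_loc)-1:
--             if "</state>" not in text[parse_loc[i-1]:loc]:
--                 continue
--         text_list.append(text[parse_loc[i-1]:loc])
--     return text_list
-- ===== SOURCE B (Python) =====
-- def parse_gold_into_sent(text):
--     segments = []
--     cur = ""
--     for i in range(len(text)):
--         if i > 0 and (text.startswith("<line>", i) or text.startswith("<output>", i)):
--             segments.append(cur)
--             cur = ""
--         cur += text[i]
--     # the trailing (possibly incomplete) sentence is kept only if it is complete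
--     if cur and "</state>" in cur:
--         segments.append(cur)
--     return segments
-- ===== Notes on version B (the rewrite author's own statement) =====
-- stated objective: simpler
-- what changed: Replaced A's two repeated-find loops plus set-dedup, sort and an index-based slicing pass over the collected boundary list by a single left-to-right scan that emits a segment at each marker boundary and keeps the trailing segment only when it is a complete sentence (ends with the closing state tag present).
import Mathlib
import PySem

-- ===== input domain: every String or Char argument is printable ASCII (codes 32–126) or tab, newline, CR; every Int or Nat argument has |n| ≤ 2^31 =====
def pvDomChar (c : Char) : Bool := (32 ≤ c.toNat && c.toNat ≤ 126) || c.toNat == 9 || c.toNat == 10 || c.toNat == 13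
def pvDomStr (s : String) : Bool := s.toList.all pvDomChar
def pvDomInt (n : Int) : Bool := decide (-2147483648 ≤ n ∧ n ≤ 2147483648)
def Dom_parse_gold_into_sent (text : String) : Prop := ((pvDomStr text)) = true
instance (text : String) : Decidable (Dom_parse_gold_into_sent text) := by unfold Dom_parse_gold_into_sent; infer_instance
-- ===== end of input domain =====

-- B replaces A's two find-loops + set-dedup + sort + slicing pass by one left-to-right scan that
-- emits segments at marker boundaries directly (objective: simpler; same return value).

-- ===== PORT A =====
-- the 'while True: num = text.find(pat, start_len); if num == -1: break; ...' loop of A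
-- (the 'start ≤ cs.length' guard only makes the recursion total: Python's find returns -1 there too)
def pvFindAll (cs pat : List Char) (start : Nat) : List Int :=
  if h : start ≤ cs.length then
    if hn : PySem.Chars.findFrom cs pat (start : Int) = -1 then []
    else (PySem.Chars.findFrom cs pat (start : Int)) ::
         pvFindAll cs pat ((PySem.Chars.findFrom cs pat (start : Int)).toNat + 1)
  else []
termination_by cs.length + 1 - start
decreasing_by
  have h1 := PySem.Chars.findFrom_natCast cs pat start h
  have h2 := PySem.Chars.find_le_length (cs.drop start) pat
  have h3 := PySem.Chars.neg_one_le_find (cs.drop start) pat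
  rw [h1] at hn ⊢
  simp only [List.length_drop] at h2
  split at hn
  · simp at hn
  · rename_i hf
    split
    · omega
    · have : (0:Int) ≤ PySem.Chars.find (List.drop start cs) pat := by
        rcases lt_or_eq_of_le h3 with h | h
        · omega
        · exact absurd h.symm hf
      omega

def parse_gold_into_sent (text : String) : List String :=
  let cs := text.toList
  let parse_loc0 : List Int :=
    pvFindAll cs "<line>".toList 0 ++ pvFindAll cs "<output>".toList 0 ++ [0, (cs.length : Int)]
  let parse_loc : List Int := PySem.List.sorted (PySem.Set.ofList parse_loc0 : List Int) (fun x => x)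
  (parse_loc.zipIdx).foldl (fun acc p =>
    if p.2 = 0 then acc
    else if p.2 = parse_loc.length - 1 ∧
        PySem.Chars.isIn "</state>".toList
          (PySem.List.slice cs (some (PySem.List.pyGetD parse_loc ((p.2 : Int) - 1) 0)) (some p.1)) = false
      then acc
      else acc ++ [String.ofList (PySem.List.slice cs (some (PySem.List.pyGetD parse_loc ((p.2 : Int) - 1) 0)) (some p.1))])
    []

-- ===== PORT B =====
-- text.startswith(m, i) with 0 ≤ i is startswith on the drop; text[i] with 0 ≤ i < len is getD (exact here)
def parse_gold_into_sent_alt (text : String) : List String :=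
  let cs := text.toList
  let st := (List.range cs.length).foldl
    (fun (st : List String × List Char) i =>
      if 0 < i ∧ (PySem.Chars.startswith (cs.drop i) "<line>".toList
                  || PySem.Chars.startswith (cs.drop i) "<output>".toList) = true
      then (st.1 ++ [String.ofList st.2], [cs.getD i ' '])
      else (st.1, st.2 ++ [cs.getD i ' ']))
    ([], [])
  if st.2 ≠ [] ∧ PySem.Chars.isIn "</state>".toList st.2 = true
  then st.1 ++ [String.ofList st.2] else st.1

-- ===== PRECONDITION & SPEC =====
def Spec_parse_gold_into_sent (text : String) (out : List String) : Prop := out = parse_gold_into_sent_alt text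
instance (text : String) (out : List String) : Decidable (Spec_parse_gold_into_sent text out) := by unfold Spec_parse_gold_into_sent; infer_instance

-- ===== CLAIM (what is proved, stated in full; the proofs are below) =====
def Claim_equal_parse_gold_into_sent : Prop := ∀ (text : String), Dom_parse_gold_into_sent text → Spec_parse_gold_into_sent text (parse_gold_into_sent text)

-- ===== LEMMAS AND PROOFS =====

lemma mem_pvFindAll (cs pat : List Char) (hp : pat ≠ []) (start : Nat) (x : Int) :
    x ∈ pvFindAll cs pat start ↔ ∃ n : Nat, x = (n : Int) ∧ start ≤ n ∧ pat <+: cs.drop n := by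
  induction start using pvFindAll.induct cs pat with
  | case1 start h hn =>
    rw [pvFindAll, dif_pos h, dif_pos hn]
    simp only [List.not_mem_nil, false_iff]
    rw [PySem.Chars.findFrom_natCast_eq_neg_one_iff cs pat start h] at hn
    rintro ⟨n, rfl, hsn, hpre⟩
    apply hn
    rw [← PySem.Chars.isIn_iff_infix, ← PySem.Chars.exists_prefix_drop_iff_isIn]
    exact ⟨n - start, by rw [List.drop_drop]; rwa [Nat.add_sub_cancel' hsn]⟩
  | case2 start h hn ih =>
    rw [pvFindAll, dif_pos h, dif_neg hn]
    obtain ⟨hle, hpre, hmin⟩ := PySem.Chars.findFrom_natCast_spec cs pat start h hn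
    set num := PySem.Chars.findFrom cs pat (start : Int) with hnum
    have h0 : (0:Int) ≤ num := le_trans (by exact_mod_cast Nat.zero_le start) hle
    simp only [List.mem_cons, ih]
    constructor
    · rintro (rfl | ⟨n, rfl, hsn, hp2⟩)
      · exact ⟨num.toNat, by omega, by omega, hpre⟩
      · exact ⟨n, rfl, by omega, hp2⟩
    · rintro ⟨n, rfl, hsn, hp2⟩
      by_cases hlt : n < num.toNat
      · exact absurd hp2 (hmin n hsn hlt)
      · by_cases heq : n = num.toNat
        · subst heq; left; omega
        · right; exact ⟨n, rfl, by omega, hp2⟩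
  | case3 start h =>
    rw [pvFindAll, dif_neg h]
    simp only [List.not_mem_nil, false_iff]
    rintro ⟨n, rfl, hsn, hpre⟩
    have : cs.drop n = [] := List.drop_eq_nil_of_le (by omega)
    rw [this, List.prefix_nil] at hpre
    exact hp hpre

def pvCut (cs : List Char) (n : Nat) : Bool :=
  PySem.Chars.startswith (cs.drop n) "<line>".toList
  || PySem.Chars.startswith (cs.drop n) "<output>".toList

def pvInnerUpTo (cs : List Char) (m : Nat) : List Nat :=
  (List.range m).filter (fun n => decide (0 < n) && pvCut cs n)

lemma pvMem_innerUpTo (cs : List Char) (m n : Nat) :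
    n ∈ pvInnerUpTo cs m ↔ 0 < n ∧ n < m ∧ pvCut cs n = true := by
  simp only [pvInnerUpTo, List.mem_filter, List.mem_range, Bool.and_eq_true, decide_eq_true_eq]
  tauto

lemma pvCut_iff (cs : List Char) (n : Nat) :
    pvCut cs n = true ↔ ("<line>".toList <+: cs.drop n ∨ "<output>".toList <+: cs.drop n) := by
  simp [pvCut, Bool.or_eq_true, PySem.Chars.startswith_iff]

lemma pvPrefix_lt (cs : List Char) {pat : List Char} (hp : pat ≠ []) {n : Nat}
    (h : pat <+: cs.drop n) : n < cs.length := by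
  by_contra hn
  rw [List.drop_eq_nil_of_le (by omega), List.prefix_nil] at h
  exact hp h



def pvIntList (l : List Nat) : List Int := l.map Int.ofNat

lemma pvMem_intList (l : List Nat) (y : Int) : y ∈ pvIntList l ↔ ∃ n ∈ l, y = (n : Int) := by
  simp only [pvIntList, List.mem_map, Int.ofNat_eq_natCast]
  tauto

lemma pvPairwiseC (cs : List Char) (hcs : cs ≠ []) :
    List.Pairwise (· < ·) (0 :: pvInnerUpTo cs cs.length ++ [cs.length]) := by
  have hlen : 0 < cs.length := List.length_pos_of_ne_nil hcs
  constructor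
  · intro b hb
    rcases List.mem_append.mp hb with h | h
    · exact ((pvMem_innerUpTo cs _ b).mp h).1
    · simp at h; omega
  · show List.Pairwise (· < ·) (pvInnerUpTo cs cs.length ++ [cs.length])
    rw [List.pairwise_append]
    refine ⟨List.Pairwise.filter _ List.pairwise_lt_range, by simp, ?_⟩
    intro a ha b hb
    simp at hb
    subst hb
    exact ((pvMem_innerUpTo cs _ a).mp ha).2.1

lemma pvSorted_eq (cs : List Char) (hcs : cs ≠ []) :
    PySem.List.sorted ((PySem.Set.ofList
        (pvFindAll cs "<line>".toList 0 ++ pvFindAll cs "<output>".toList 0 ++ [0, (cs.length : Int)])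
      : List Int)) (fun x => x)
    = pvIntList (0 :: pvInnerUpTo cs cs.length ++ [cs.length]) := by
  have hpw : List.Pairwise (· < ·) (0 :: pvInnerUpTo cs cs.length ++ [cs.length]) := pvPairwiseC cs hcs
  have hpwI : List.Pairwise (fun a b : Int => (fun x : Int => x) a < (fun x : Int => x) b)
      (pvIntList (0 :: pvInnerUpTo cs cs.length ++ [cs.length])) := by
    rw [pvIntList, List.pairwise_map]
    exact hpw.imp (fun h => by simpa using Int.ofNat_lt.mpr h)
  apply PySem.List.sorted_eq_of_perm_of_pairwise_lt _ _ _ _ hpwI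
  rw [List.perm_ext_iff_of_nodup (hpwI.imp ne_of_lt) (PySem.Set.nodup_ofList _)]
  intro y
  rw [PySem.Set.mem_ofList, pvMem_intList]
  have h1 : ("<line>".toList : List Char) ≠ [] := by decide
  have h2 : ("<output>".toList : List Char) ≠ [] := by decide
  constructor
  · rintro ⟨n, hn, rfl⟩
    rcases List.mem_cons.mp hn with rfl | hn2
    · simp
    · rcases List.mem_append.mp hn2 with h | h
      · rcases (pvCut_iff cs n).mp ((pvMem_innerUpTo cs _ n).mp h).2.2 with hpre | hpre
        · refine List.mem_append.mpr (Or.inl (List.mem_append.mpr (Or.inl ?_)))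
          exact (mem_pvFindAll cs _ h1 0 _).mpr ⟨n, rfl, Nat.zero_le n, hpre⟩
        · refine List.mem_append.mpr (Or.inl (List.mem_append.mpr (Or.inr ?_)))
          exact (mem_pvFindAll cs _ h2 0 _).mpr ⟨n, rfl, Nat.zero_le n, hpre⟩
      · simp only [List.mem_cons, List.not_mem_nil, or_false] at h
        subst h
        simp
  · intro hy
    rcases List.mem_append.mp hy with h | h
    · rcases List.mem_append.mp h with h | h
      · obtain ⟨n, rfl, -, hpre⟩ := (mem_pvFindAll cs _ h1 0 _).mp h
        refine ⟨n, ?_, rfl⟩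
        rcases Nat.eq_zero_or_pos n with rfl | hn0
        · exact List.mem_cons_self ..
        · refine List.mem_cons.mpr (Or.inr (List.mem_append.mpr (Or.inl ?_)))
          exact (pvMem_innerUpTo cs _ n).mpr ⟨hn0, pvPrefix_lt cs h1 hpre, (pvCut_iff cs n).mpr (Or.inl hpre)⟩
      · obtain ⟨n, rfl, -, hpre⟩ := (mem_pvFindAll cs _ h2 0 _).mp h
        refine ⟨n, ?_, rfl⟩
        rcases Nat.eq_zero_or_pos n with rfl | hn0
        · exact List.mem_cons_self ..
        · refine List.mem_cons.mpr (Or.inr (List.mem_append.mpr (Or.inl ?_)))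
          exact (pvMem_innerUpTo cs _ n).mpr ⟨hn0, pvPrefix_lt cs h2 hpre, (pvCut_iff cs n).mpr (Or.inr hpre)⟩
    · rcases List.mem_cons.mp h with rfl | h
      · exact ⟨0, List.mem_cons_self .., rfl⟩
      · simp only [List.mem_cons, List.not_mem_nil, or_false] at h
        subst h
        exact ⟨cs.length, by simp, rfl⟩

def pvSeg (cs : List Char) (a b : Nat) : List Char := (cs.drop a).take (b - a)

def pvSegsB (cs : List Char) : Nat → List Nat → List (List Char)
  | _, [] => []
  | a, b :: r => pvSeg cs a b :: pvSegsB cs b r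

def pvSegsF (cs : List Char) : Nat → List Nat → List (List Char)
  | _, [] => []
  | a, [b] => if PySem.Chars.isIn "</state>".toList (pvSeg cs a b) then [pvSeg cs a b] else []
  | a, b :: c :: r => pvSeg cs a b :: pvSegsF cs b (c :: r)

def pvCanon (cs : List Char) : List String :=
  (pvSegsF cs 0 (pvInnerUpTo cs cs.length ++ [cs.length])).map String.ofList

lemma pvGetD_intList (C : List Nat) (k : Nat) (hk : k < C.length) :
    PySem.List.pyGetD (pvIntList C) ((k : Nat) : Int) 0 = Int.ofNat (C[k]) := by
  rw [PySem.List.pyGetD_natCast, pvIntList,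
    List.getD_eq_getElem _ _ (by simpa [pvIntList] using hk), List.getElem_map]

lemma pvFoldA (cs : List Char) (C : List Nat) :
    ∀ (tl pre : List Nat) (hpre : pre ≠ []) (acc : List String), C = pre ++ tl →
    List.foldl (fun acc (p : Int × Nat) =>
      if p.2 = 0 then acc
      else if p.2 = (pvIntList C).length - 1 ∧
          PySem.Chars.isIn "</state>".toList
            (PySem.List.slice cs (some (PySem.List.pyGetD (pvIntList C) ((p.2 : Int) - 1) 0)) (some p.1)) = false
        then acc
        else acc ++ [String.ofList (PySem.List.slice cs (some (PySem.List.pyGetD (pvIntList C) ((p.2 : Int) - 1) 0)) (some p.1))])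
      acc (List.zipIdx (pvIntList tl) pre.length)
    = acc ++ (pvSegsF cs (pre.getLast hpre) tl).map String.ofList := by
  intro tl
  induction tl with
  | nil => intro pre hpre acc h; simp [pvIntList, pvSegsF]
  | cons b tl' ih =>
    intro pre hpre acc h
    have hne0 : pre.length ≠ 0 := (List.length_pos_of_ne_nil hpre).ne'
    have hkC : pre.length - 1 < C.length := by
      subst h; simp [List.length_append]; omega
    have hcast : ((pre.length : Int) - 1) = ((pre.length - 1 : Nat) : Int) := by omega
    have hCget : C[pre.length - 1]'hkC = pre.getLast hpre := by
      subst h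
      rw [List.getElem_append_left (by omega), ← List.getLast_eq_getElem]
    have hgd : PySem.List.pyGetD (pvIntList C) ((pre.length : Int) - 1) 0
        = Int.ofNat (pre.getLast hpre) := by
      rw [hcast, pvGetD_intList C _ hkC, hCget]
    have hsl : PySem.List.slice cs (some (Int.ofNat (pre.getLast hpre))) (some (Int.ofNat b))
        = pvSeg cs (pre.getLast hpre) b := by
      exact PySem.List.slice_natCast cs (pre.getLast hpre) b
    have hlen : (pvIntList C).length = C.length := by simp [pvIntList]
    rw [show pvIntList (b :: tl') = Int.ofNat b :: pvIntList tl' from rfl, List.zipIdx_cons,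
      List.foldl_cons]
    cases tl' with
    | nil =>
      have hcond : pre.length = (pvIntList C).length - 1 := by
        subst h; simp [pvIntList]
      simp only [if_neg hne0, hgd, hsl]
      by_cases hi : PySem.Chars.isIn "</state>".toList (pvSeg cs (pre.getLast hpre) b) = false
      · rw [if_pos ⟨hcond, hi⟩]
        have he : pvSegsF cs (pre.getLast hpre) [b] = [] := by
          rw [pvSegsF]
          have hi' : PySem.Chars.isIn ['<','/','s','t','a','t','e','>'] (pvSeg cs (pre.getLast hpre) b) = false := hi
          simp [hi']
        simp [pvIntList, he]
      · rw [if_neg (by tauto)]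
        simp only [Bool.not_eq_false] at hi
        have he : pvSegsF cs (pre.getLast hpre) [b] = [pvSeg cs (pre.getLast hpre) b] := by
          rw [pvSegsF]
          have hi' : PySem.Chars.isIn ['<','/','s','t','a','t','e','>'] (pvSeg cs (pre.getLast hpre) b) = true := hi
          simp [hi']
        simp [pvIntList, he]
    | cons c r =>
      have hcond : ¬ (pre.length = (pvIntList C).length - 1) := by
        subst h; simp [pvIntList, List.length_append]
      rw [if_neg hne0, if_neg (by tauto), hgd, hsl]
      have h' : C = (pre ++ [b]) ++ c :: r := by rw [h]; simp
      have := ih (pre ++ [b]) (by simp) (acc ++ [String.ofList (pvSeg cs (pre.getLast hpre) b)]) h'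
      rw [List.length_append] at this
      simp only [List.length_cons, List.length_nil] at this ⊢
      rw [this, List.getLast_concat]
      have hsf : pvSegsF cs (pre.getLast hpre) (b :: c :: r)
          = pvSeg cs (pre.getLast hpre) b :: pvSegsF cs b (c :: r) := rfl
      rw [hsf]
      simp

lemma pvFindAll_nil (pat : List Char) (hp : pat ≠ []) : pvFindAll [] pat 0 = [] := by
  rw [pvFindAll]
  have h : PySem.Chars.find [] pat = -1 := by
    rw [PySem.Chars.find_eq_neg_one_iff]
    intro h; exact hp (List.infix_nil.mp h)
  simp [h]

lemma pvA_eq_canon (t : String) : parse_gold_into_sent t = pvCanon t.toList := by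
  rcases eq_or_ne t.toList [] with hcs | hcs
  · simp only [parse_gold_into_sent, hcs]
    rw [pvFindAll_nil "<line>".toList (by decide), pvFindAll_nil "<output>".toList (by decide)]
    rw [pvCanon]
    decide
  · simp only [parse_gold_into_sent]
    rw [pvSorted_eq t.toList hcs]
    have h0 : ((Int.ofNat 0, 0) : Int × Nat).2 = 0 := rfl
    have hfa := pvFoldA t.toList (0 :: pvInnerUpTo t.toList t.toList.length ++ [t.toList.length])
      (pvInnerUpTo t.toList t.toList.length ++ [t.toList.length]) [0] (by simp) [] (by simp)
    simp only [pvIntList] at hfa ⊢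
    rw [show (List.map Int.ofNat (0 :: pvInnerUpTo t.toList t.toList.length ++ [t.toList.length])).zipIdx
        = ((Int.ofNat 0, 0) : Int × Nat)
          :: (List.map Int.ofNat (pvInnerUpTo t.toList t.toList.length ++ [t.toList.length])).zipIdx (0 + 1) from by
      simp]
    rw [List.foldl_cons, if_pos h0]
    simp only [List.length_cons, List.length_nil, List.getLast_singleton, List.nil_append,
      Nat.zero_add] at hfa ⊢
    rw [hfa, pvCanon]

lemma pvSegsB_snoc (cs : List Char) (l : List Nat) (a b : Nat) :
    pvSegsB cs a (l ++ [b])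
      = pvSegsB cs a l ++ [pvSeg cs ((a :: l).getLast (List.cons_ne_nil a l)) b] := by
  induction l generalizing a with
  | nil => simp [pvSegsB]
  | cons x xs ih =>
    rw [List.cons_append, pvSegsB, ih x, pvSegsB]
    rw [List.getLast_cons (List.cons_ne_nil x xs)]
    simp

lemma pvSegsF_decomp (cs : List Char) (l : List Nat) (a b : Nat) :
    pvSegsF cs a (l ++ [b])
      = pvSegsB cs a l ++
        (if PySem.Chars.isIn "</state>".toList
            (pvSeg cs ((a :: l).getLast (List.cons_ne_nil a l)) b) = true
         then [pvSeg cs ((a :: l).getLast (List.cons_ne_nil a l)) b] else []) := by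
  induction l generalizing a with
  | nil => simp [pvSegsF, pvSegsB]
  | cons x xs ih =>
    rcases hxs : xs ++ [b] with _ | ⟨y, ys⟩
    · exact absurd hxs (by simp)
    · rw [List.cons_append, hxs, pvSegsF, ← hxs, ih x, pvSegsB]
      rw [List.getLast_cons (List.cons_ne_nil x xs)]
      simp

lemma pvLast_le (cs : List Char) (m : Nat) :
    (0 :: pvInnerUpTo cs m).getLast (List.cons_ne_nil _ _) ≤ m := by
  have h := List.getLast_mem (l := 0 :: pvInnerUpTo cs m) (List.cons_ne_nil _ _)
  rcases List.mem_cons.mp h with h' | h'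
  · omega
  · exact le_of_lt ((pvMem_innerUpTo cs m _).mp h').2.1

lemma pvLast_lt (cs : List Char) (m : Nat) (hm : 0 < m) :
    (0 :: pvInnerUpTo cs m).getLast (List.cons_ne_nil _ _) < m := by
  have h := List.getLast_mem (l := 0 :: pvInnerUpTo cs m) (List.cons_ne_nil _ _)
  rcases List.mem_cons.mp h with h' | h'
  · omega
  · exact ((pvMem_innerUpTo cs m _).mp h').2.1

lemma pvInnerUpTo_succ (cs : List Char) (m : Nat) :
    pvInnerUpTo cs (m + 1)
      = pvInnerUpTo cs m ++ (if decide (0 < m) && pvCut cs m then [m] else []) := by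
  rw [pvInnerUpTo, List.range_succ, List.filter_append, pvInnerUpTo]
  simp only [List.filter_cons, List.filter_nil]

lemma pvFoldB (cs : List Char) (m : Nat) (hm : m ≤ cs.length) :
    (List.range m).foldl
      (fun (st : List String × List Char) i =>
        if 0 < i ∧ (PySem.Chars.startswith (cs.drop i) "<line>".toList
                    || PySem.Chars.startswith (cs.drop i) "<output>".toList) = true
        then (st.1 ++ [String.ofList st.2], [cs.getD i ' '])
        else (st.1, st.2 ++ [cs.getD i ' '])) ([], [])
    = ((pvSegsB cs 0 (pvInnerUpTo cs m)).map String.ofList,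
       pvSeg cs ((0 :: pvInnerUpTo cs m).getLast (List.cons_ne_nil _ _)) m) := by
  induction m with
  | zero => simp [pvInnerUpTo, pvSegsB, pvSeg]
  | succ m ih =>
    have hmlt : m < cs.length := by omega
    rw [List.range_succ, List.foldl_append, ih (by omega), List.foldl_cons, List.foldl_nil]
    have hgetD : cs.getD m ' ' = cs[m] := List.getD_eq_getElem cs ' ' hmlt
    have hseg1 : pvSeg cs m (m + 1) = [cs[m]] := by
      rw [pvSeg, Nat.add_sub_cancel_left, List.drop_eq_getElem_cons hmlt]
      rfl
    by_cases hc : 0 < m ∧ (PySem.Chars.startswith (cs.drop m) "<line>".toList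
        || PySem.Chars.startswith (cs.drop m) "<output>".toList) = true
    · rw [if_pos hc]
      have hcut : (decide (0 < m) && pvCut cs m) = true := by
        rw [Bool.and_eq_true, decide_eq_true_eq]
        exact ⟨hc.1, hc.2⟩
      rw [pvInnerUpTo_succ, if_pos hcut]
      have hg : (0 :: (pvInnerUpTo cs m ++ [m])).getLast (List.cons_ne_nil _ _) = m := by
        exact List.getLast_concat (l := 0 :: pvInnerUpTo cs m) (a := m)
      rw [pvSegsB_snoc cs (pvInnerUpTo cs m) 0 m]
      simp only [List.map_append, Prod.mk.injEq]
      exact ⟨by trivial, by rw [hg, hseg1, hgetD]⟩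
    · rw [if_neg hc]
      have hcut : ¬ ((decide (0 < m) && pvCut cs m) = true) := by
        rw [Bool.and_eq_true, decide_eq_true_eq]
        rintro ⟨h1, h2⟩
        exact hc ⟨h1, h2⟩
      rw [pvInnerUpTo_succ, if_neg hcut, List.append_nil]
      have hlast := pvLast_le cs m
      have hext : pvSeg cs ((0 :: pvInnerUpTo cs m).getLast (List.cons_ne_nil _ _)) m ++ [cs[m]]
          = pvSeg cs ((0 :: pvInnerUpTo cs m).getLast (List.cons_ne_nil _ _)) (m + 1) := by
        set c := (0 :: pvInnerUpTo cs m).getLast (List.cons_ne_nil _ _) with hc'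
        rw [pvSeg, pvSeg, show m + 1 - c = (m - c) + 1 from by omega, List.take_add_one]
        congr 1
        rw [List.getElem?_drop, show c + (m - c) = m from by omega,
          List.getElem?_eq_getElem hmlt]
        rfl
      simp only [Prod.mk.injEq]
      exact ⟨by trivial, by rw [hgetD, hext]⟩

lemma pvB_eq_canon (t : String) : parse_gold_into_sent_alt t = pvCanon t.toList := by
  rcases eq_or_ne t.toList [] with hcs | hcs
  · simp only [parse_gold_into_sent_alt, hcs]
    rw [pvCanon]
    decide
  · have hlen0 : 0 < t.toList.length := List.length_pos_of_ne_nil hcs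
    simp only [parse_gold_into_sent_alt]
    rw [pvFoldB t.toList t.toList.length le_rfl]
    have hclt : (0 :: pvInnerUpTo t.toList t.toList.length).getLast (List.cons_ne_nil _ _)
        < t.toList.length := pvLast_lt t.toList _ hlen0
    set K := pvInnerUpTo t.toList t.toList.length with hK
    set c := (0 :: K).getLast (List.cons_ne_nil _ _) with hc
    have hcur : pvSeg t.toList c t.toList.length = t.toList.drop c := by
      rw [pvSeg]
      exact List.take_of_length_le (by simp)
    have hne : pvSeg t.toList c t.toList.length ≠ [] := by
      rw [hcur, Ne, List.drop_eq_nil_iff]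
      omega
    rw [pvCanon, ← hK, pvSegsF_decomp t.toList K 0 t.toList.length, ← hc]
    by_cases hi : PySem.Chars.isIn "</state>".toList (pvSeg t.toList c t.toList.length) = true
    · rw [if_pos ⟨hne, hi⟩, if_pos hi]
      simp
    · rw [if_neg (by tauto), if_neg hi]
      simp

-- ===== VERDICT (by name: the statement is the Claim_ definition above) =====
theorem parse_gold_into_sent_spec : Claim_equal_parse_gold_into_sent := by
  intro text _
  unfold Spec_parse_gold_into_sent
  rw [pvA_eq_canon, pvB_eq_canon]
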